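-- pv_equiv track=rewrite | github.com/Corvid-lang/Corvid-lang | examples/cdylib_catalog_demo/host_py/replay_host.py | deterministic_seed
-- ===== SOURCE A (Python) =====
-- def deterministic_seed(events):
--     for event in events:
--         if event.get("kind") == "seed_read" and event.get("purpose") == "rollout_default_seed":
--             return int(event["value"])
--     for event in events:
--         if event.get("kind") == "schema_header":
--             return int(event.get("ts_ms", 0))
--     return 0
-- ===== SOURCE B (Python) =====
-- def deterministic_seed(events):
--     # Single backward pass with overwrite accumulators: walking the list in
--     # reverse, an earlier (lefter) match simply overwrites, so after the loop
--     # the accumulators hold the FIRST matching seed_read's raw value and the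
--     # FIRST schema_header's raw ts; conversion is deferred to the end and a
--     # matching seed_read outranks any schema_header.
--     seed = None
--     ts = None
--     for event in reversed(events):
--         kind = event.get("kind")
--         if kind == "seed_read" and event.get("purpose") == "rollout_default_seed":
--             seed = event.get("value")
--         elif kind == "schema_header":
--             ts = event.get("ts_ms", "0")
--     if seed is not None:
--         return int(seed)
--     return int(ts) if ts is not None else 0
-- ===== Notes on version B (the rewrite author's own statement) =====
-- stated objective: alternative
-- what changed: Replaced A's two forward scans with early returns by one backward pass with overwrite accumulators (leftmost match wins by overwriting), raw strings kept during the scan and int-conversion deferred to a single final step.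
import Mathlib
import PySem

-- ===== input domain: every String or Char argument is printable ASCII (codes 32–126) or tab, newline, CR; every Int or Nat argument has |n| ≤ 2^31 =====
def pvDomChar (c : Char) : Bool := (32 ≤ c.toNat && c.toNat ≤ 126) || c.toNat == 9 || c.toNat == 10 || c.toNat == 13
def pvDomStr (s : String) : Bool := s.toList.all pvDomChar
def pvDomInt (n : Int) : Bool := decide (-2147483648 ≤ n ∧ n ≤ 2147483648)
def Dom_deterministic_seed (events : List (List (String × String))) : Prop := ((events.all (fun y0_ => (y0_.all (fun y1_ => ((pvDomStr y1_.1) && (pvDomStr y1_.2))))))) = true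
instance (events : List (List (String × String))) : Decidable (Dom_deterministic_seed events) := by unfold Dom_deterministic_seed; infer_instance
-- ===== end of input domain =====

-- B replaces A's two forward scans with early returns by ONE backward pass with
-- overwrite accumulators, converting to int only after the scan (objective:
-- alternative decomposition, same cost).

-- ===== PORT A =====
-- first loop of A: first seed_read/rollout_default_seed event, int(event["value"])
def dsLoop1 : List (List (String × String)) → Option Int
  | [] => none
  | e :: rest =>
    if (PySem.Dict.mk e).get? "kind" == some "seed_read"
        && (PySem.Dict.mk e).get? "purpose" == some "rollout_default_seed" then
      some ((((PySem.Dict.mk e).get? "value").bind PySem.Int.ofStr?).getD 0)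
    else dsLoop1 rest

-- second loop of A: first schema_header event, int(event.get("ts_ms", 0))
def dsLoop2 : List (List (String × String)) → Option Int
  | [] => none
  | e :: rest =>
    if (PySem.Dict.mk e).get? "kind" == some "schema_header" then
      some (match (PySem.Dict.mk e).get? "ts_ms" with
            | some s => (PySem.Int.ofStr? s).getD 0
            | none => 0)
    else dsLoop2 rest

def deterministic_seed (events : List (List (String × String))) : Int :=
  match dsLoop1 events with
  | some v => v
  | none =>
    match dsLoop2 events with
    | some v => v
    | none => 0

-- ===== PORT B =====
-- the backward loop of Source B: state = (seed raw value, schema_header raw ts);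
-- the list handed in is events.reverse, and each step may OVERWRITE a slot,
-- so the final state holds the leftmost match of each kind.
def dsRev : List (List (String × String)) → Option String × Option String → Option String × Option String
  | [], st => st
  | e :: rest, (s, t) =>
    let kind := (PySem.Dict.mk e).get? "kind"
    if kind == some "seed_read"
        && (PySem.Dict.mk e).get? "purpose" == some "rollout_default_seed" then
      dsRev rest ((PySem.Dict.mk e).get? "value", t)
    else if kind == some "schema_header" then
      dsRev rest (s, some ((PySem.Dict.mk e).getD "ts_ms" "0"))
    else dsRev rest (s, t)

-- int(seed) / int(ts): Python raises on an unparsable string; Pre_ excludes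
-- exactly those inputs, so the `.getD 0` default is never claimed.
def deterministic_seed_alt (events : List (List (String × String))) : Int :=
  match dsRev events.reverse (none, none) with
  | (some s, _) => (PySem.Int.ofStr? s).getD 0
  | (none, some t) => (PySem.Int.ofStr? t).getD 0
  | (none, none) => 0

-- ===== PRECONDITION & SPEC =====
def seedEvt? (e : List (String × String)) : Bool :=
  (PySem.Dict.mk e).get? "kind" == some "seed_read"
    && (PySem.Dict.mk e).get? "purpose" == some "rollout_default_seed"

def hdrEvt? (e : List (String × String)) : Bool :=
  (PySem.Dict.mk e).get? "kind" == some "schema_header"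

-- Pre_ excludes exactly the inputs where Python A raises: a first matching
-- seed_read event whose "value" is missing or not int-parsable, or (no matching
-- seed_read) a first schema_header whose present "ts_ms" is not int-parsable.
def Pre_deterministic_seed (events : List (List (String × String))) : Prop :=
  (match events.find? seedEvt? with
   | some e => (((PySem.Dict.mk e).get? "value").bind PySem.Int.ofStr?).isSome
   | none =>
     match events.find? hdrEvt? with
     | some e => (match (PySem.Dict.mk e).get? "ts_ms" with
                  | some s => (PySem.Int.ofStr? s).isSome
                  | none => true)
     | none => true) = true
instance (events : List (List (String × String))) : Decidable (Pre_deterministic_seed events) := by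
  unfold Pre_deterministic_seed; infer_instance

def pvWitness_deterministic_seed : (List (List (String × String))) :=
  [[("kind", "schema_header"), ("ts_ms", "42")], [("kind", "seed_read"), ("purpose", "rollout_default_seed"), ("value", "7")]]

def Spec_deterministic_seed (events : List (List (String × String))) (out : Int) : Prop := out = deterministic_seed_alt events
instance (events : List (List (String × String))) (out : Int) : Decidable (Spec_deterministic_seed events out) := by unfold Spec_deterministic_seed; infer_instance

-- ===== CLAIM (what is proved, stated in full; the proofs are below) =====
def Claim_equal_deterministic_seed : Prop := ∀ (events : List (List (String × String))), Dom_deterministic_seed events → Pre_deterministic_seed events → Spec_deterministic_seed events (deterministic_seed events)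

-- ===== LEMMAS AND PROOFS =====

-- the overwrite fold equals "last match in the processed list", i.e. first
-- match in its reverse, for each slot independently.
theorem dsRev_eq (l : List (List (String × String))) (s t : Option String) :
    dsRev l (s, t) =
      ((match l.reverse.find? seedEvt? with
        | some e => (PySem.Dict.mk e).get? "value"
        | none => s),
       (match l.reverse.find? hdrEvt? with
        | some e => some ((PySem.Dict.mk e).getD "ts_ms" "0")
        | none => t)) := by
  induction l generalizing s t with
  | nil => simp [dsRev]
  | cons e rest ih =>
    simp only [dsRev, List.reverse_cons, List.find?_append]
    by_cases h1 : seedEvt? e = true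
    · have h2 : hdrEvt? e = false := by
        unfold seedEvt? at h1; unfold hdrEvt?
        rcases Bool.and_eq_true .. |>.mp h1 with ⟨hk, _⟩
        simp at hk ⊢
        rw [hk]; decide
      have hs : List.find? seedEvt? [e] = some e := by simp [List.find?, h1]
      have ht : List.find? hdrEvt? [e] = none := by simp [List.find?, h2]
      unfold seedEvt? at h1
      simp only [h1, if_true, ih, hs, ht]
      cases hf : rest.reverse.find? seedEvt? <;>
        cases hg : rest.reverse.find? hdrEvt? <;>
          simp [Option.or]
    · have hs : List.find? seedEvt? [e] = none := by
        simp only [List.find?]; rw [Bool.of_not_eq_true h1]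
      by_cases h2 : hdrEvt? e = true
      · have ht : List.find? hdrEvt? [e] = some e := by simp [List.find?, h2]
        unfold seedEvt? at h1
        rw [Bool.of_not_eq_true h1]
        unfold hdrEvt? at h2
        simp only [Bool.false_eq_true, if_false, h2, if_true, ih, hs, ht]
        cases hf : rest.reverse.find? seedEvt? <;>
          cases hg : rest.reverse.find? hdrEvt? <;>
            simp [Option.or]
      · have ht : List.find? hdrEvt? [e] = none := by
          simp only [List.find?]; rw [Bool.of_not_eq_true h2]
        unfold seedEvt? at h1
        rw [Bool.of_not_eq_true h1]
        unfold hdrEvt? at h2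
        rw [Bool.of_not_eq_true h2]
        simp only [Bool.false_eq_true, if_false, ih, hs, ht]
        cases hf : rest.reverse.find? seedEvt? <;>
          cases hg : rest.reverse.find? hdrEvt? <;>
            simp [Option.or]

theorem dsLoop1_eq_find (l : List (List (String × String))) :
    dsLoop1 l = (l.find? seedEvt?).map
      (fun e => (((PySem.Dict.mk e).get? "value").bind PySem.Int.ofStr?).getD 0) := by
  induction l with
  | nil => simp [dsLoop1]
  | cons e rest ih =>
    by_cases h : seedEvt? e = true <;>
      · unfold seedEvt? at h
        simp [dsLoop1, List.find?, h, ih, seedEvt?]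

theorem dsLoop2_eq_find (l : List (List (String × String))) :
    dsLoop2 l = (l.find? hdrEvt?).map
      (fun e => match (PySem.Dict.mk e).get? "ts_ms" with
                | some s => (PySem.Int.ofStr? s).getD 0
                | none => 0) := by
  induction l with
  | nil => simp [dsLoop2]
  | cons e rest ih =>
    by_cases h : hdrEvt? e = true <;>
      · unfold hdrEvt? at h
        simp [dsLoop2, List.find?, h, ih, hdrEvt?]

-- ===== VERDICT (by name: the statement is the Claim_ definition above) =====
theorem deterministic_seed_spec : Claim_equal_deterministic_seed := by
  intro events _ hpre
  unfold Spec_deterministic_seed deterministic_seed deterministic_seed_alt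
  unfold Pre_deterministic_seed at hpre
  rw [dsRev_eq, List.reverse_reverse, dsLoop1_eq_find, dsLoop2_eq_find]
  cases hf : events.find? seedEvt? with
  | some e =>
    simp only [hf] at hpre ⊢
    cases hv : (PySem.Dict.mk e).get? "value" with
    | none => simp [hv] at hpre
    | some s =>
      cases hp : PySem.Int.ofStr? s with
      | none => simp [hv, hp] at hpre
      | some v => simp [hv, hp]
  | none =>
    simp only [hf] at hpre ⊢
    cases hg : events.find? hdrEvt? with
    | some e =>
      simp only [hg] at hpre ⊢
      cases ht : (PySem.Dict.mk e).get? "ts_ms" with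
      | none =>
        simp only [ht, PySem.Dict.getD]
        simp [ht]
        decide
      | some s =>
        cases hp : PySem.Int.ofStr? s with
        | none => simp [ht, hp] at hpre
        | some v => simp [PySem.Dict.getD, ht, hp]
    | none => simp
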